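-- pv_equiv track=rewrite | github.com/ImoutoHeaven/scripts-examples | rclone_batch_transfer/rename_beta.py | is_filename_compliant
-- ===== SOURCE A (Python) =====
-- def parse_starting_tokens(name):
--     """
--     Parse the starting tokens (brackets) in a filename.
--     Returns list of tuples (bracket_type, token).
--     """
--     tokens = []
--     pos = 0
--     length = len(name)
--     while pos < length:
--         # Skip any leading spaces
--         while pos < length and name[pos] == ' ':
--             pos += 1
--         if pos >= length:
--             break
--         if name[pos] == '[':
--             # Parse token enclosed in []
--             start = pos
--             pos += 1
--             depth = 1
--             while pos < length and depth > 0: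
--                 if name[pos] == '[':
--                     depth += 1
--                 elif name[pos] == ']':
--                     depth -= 1
--                 pos += 1
--             if depth == 0:
--                 token = name[start:pos]
--                 tokens.append(('[]', token))
--             else:
--                 break
--         elif name[pos] == '(':
--             # Parse token enclosed in ()
--             start = pos
--             pos += 1
--             depth = 1
--             while pos < length and depth > 0:
--                 if name[pos] == '(':
--                     depth += 1
--                 elif name[pos] == ')':
--                     depth -= 1
--                 pos += 1
--             if depth == 0:
--                 token = name[start:pos]
--                 tokens.append(('()', token))
--             else:
--                 break
--         else:
--             break
--     return tokens
--
-- def is_filename_compliant(name):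
--     """
--     Check if filename complies with the naming convention.
--     """
--     tokens = parse_starting_tokens(name)
--     # If no tokens parsed, check if the first character is not '[' or '(', warn
--     if not tokens:
--         # If the first non-space character is not '[' or '(', warn
--         first_char = name.lstrip()[0] if name.lstrip() else ''
--         if first_char not in ['[', '(']:
--             return False
--     else:
--         token_types = [t[0] for t in tokens]
--         if '[]' not in token_types:
--             # No '[]' token, warn
--             return False
--         first_bracket_type = token_types[0]
--         if first_bracket_type == '()':
--             # Tokens start with '()'
--             # Check if there are two or more '()' before any '[]'
--             index_of_first_square = token_types.index('[]')
--             num_paren_before_square = index_of_first_square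
--             if num_paren_before_square > 1:
--                 return False
--         elif first_bracket_type == '[]':
--             # Tokens start with '[]'
--             # Check if there are multiple '[]' at the start
--             num_initial_square = 1
--             i = 1
--             while i < len(token_types) and token_types[i] == '[]':
--                 num_initial_square += 1
--                 i += 1
--             if num_initial_square > 1:
--                 return False
--             # If next token is '()', warn
--             if i < len(token_types) and token_types[i] == '()':
--                 return False
--         else:
--             # First token is neither '[]' nor '()', warn
--             return False
--     return True
-- ===== SOURCE B (Python) =====
-- def is_filename_compliant(name):
--     """Check if filename complies with the naming convention.
--
--     Single early-stopping scan: parse at most the first TWO bracket tokens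
--     (the acceptance rules never need more) instead of building the full
--     token list first.
--     """
--     def next_token(pos):
--         # skip spaces, then consume one balanced bracket token; return
--         # (opening char, position after token) or None.
--         n = len(name)
--         while pos < n and name[pos] == ' ':
--             pos += 1
--         if pos >= n or name[pos] not in '[(':
--             return None
--         opener = name[pos]
--         closer = ']' if opener == '[' else ')'
--         depth = 1
--         pos += 1
--         while pos < n and depth > 0:
--             if name[pos] == opener:
--                 depth += 1
--             elif name[pos] == closer:
--                 depth -= 1
--             pos += 1
--         if depth != 0:
--             return None
--         return (opener, pos)
--
--     first = next_token(0)
--     if first is None: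
--         # no parsable token: accept exactly when the name starts (after
--         # whitespace) with a bracket character
--         stripped = name.lstrip()
--         return bool(stripped) and stripped[0] in '[('
--     kind, pos = first
--     second = next_token(pos)
--     if kind == '[':
--         # a leading '[]' token must be the only token
--         return second is None
--     # leading '()': the very next token must exist and be '[]'
--     return second is not None and second[0] == '['
-- ===== Notes on version B (the rewrite author's own statement) =====
-- stated objective: alternative
-- what changed: B replaces the full token-list parse plus list-based rule checks (map, membership, index, run-counting loop) with an early-stopping scan that parses at most the first two bracket tokens and decides compliance from their kinds alone.
import Mathlib
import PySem

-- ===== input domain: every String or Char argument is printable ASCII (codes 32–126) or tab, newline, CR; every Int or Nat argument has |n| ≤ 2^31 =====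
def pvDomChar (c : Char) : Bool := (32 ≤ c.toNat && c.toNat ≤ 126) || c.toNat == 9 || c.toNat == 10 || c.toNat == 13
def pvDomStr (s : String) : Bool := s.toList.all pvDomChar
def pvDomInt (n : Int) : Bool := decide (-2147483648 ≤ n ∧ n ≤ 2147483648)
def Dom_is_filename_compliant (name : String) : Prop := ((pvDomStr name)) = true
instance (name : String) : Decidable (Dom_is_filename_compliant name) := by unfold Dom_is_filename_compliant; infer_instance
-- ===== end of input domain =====

-- B re-implements the check as an early-stopping scan that parses at most the first two
-- bracket tokens instead of building the full token list (objective: alternative).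

-- ===== PORT A =====

-- inner `while pos < length and depth > 0` loop of parse_starting_tokens:
-- returns (consumed chars in order, remaining chars, final depth)
def pvInnerA (oc cc : Char) : List Char → Nat → List Char × List Char × Nat
  | cs, 0 => ([], cs, 0)
  | [], d + 1 => ([], [], d + 1)
  | c :: rest, d + 1 =>
      let d' := if c = oc then d + 2 else if c = cc then d else d + 1
      let r := pvInnerA oc cc rest d'
      (c :: r.1, r.2.1, r.2.2)

theorem pvInnerA_len (oc cc : Char) (cs : List Char) (d : Nat) :
    (pvInnerA oc cc cs d).2.1.length ≤ cs.length := by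
  induction cs generalizing d with
  | nil => cases d <;> simp [pvInnerA]
  | cons c rest ih =>
      cases d with
      | zero => simp [pvInnerA]
      | succ d =>
          simp only [pvInnerA]
          exact le_trans (ih _) (Nat.le_succ _)

-- outer loop of parse_starting_tokens (token text kept, as in the Python)
def pvParseTokens (cs : List Char) : List (String × String) :=
  match h : cs.dropWhile (· = ' ') with
  | [] => []
  | c :: rest =>
    if c = '[' then
      let r := pvInnerA '[' ']' rest 1
      if r.2.2 = 0 then ("[]", String.mk ('[' :: r.1)) :: pvParseTokens r.2.1 else []
    else if c = '(' then
      let r := pvInnerA '(' ')' rest 1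
      if r.2.2 = 0 then ("()", String.mk ('(' :: r.1)) :: pvParseTokens r.2.1 else []
    else []
termination_by cs.length
decreasing_by
  all_goals
    have h1 := pvInnerA_len '[' ']' rest 1
    have h2 := pvInnerA_len '(' ')' rest 1
    have h3 : (cs.dropWhile (· = ' ')).length ≤ cs.length := cs.length_dropWhile_le _
    rw [h] at h3
    simp at h3 ⊢
    omega

-- the i/num_initial_square while loop: number of leading "[]" entries
def pvLeadSq : List String → Nat
  | [] => 0
  | t :: ts => if t = "[]" then 1 + pvLeadSq ts else 0

def is_filename_compliant (name : String) : Bool :=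
  let tokens := pvParseTokens name.toList
  if tokens.isEmpty then
    -- first_char = name.lstrip()[0] if name.lstrip() else ''; '' is not '[' nor '('
    match PySem.Chars.lstrip name.toList with
    | [] => false
    | c :: _ => if ¬ (c = '[' ∨ c = '(') then false else true
  else
    let token_types := tokens.map Prod.fst
    if ¬ (token_types.contains "[]") then false
    else
      let first_bracket_type := token_types.headD ""
      if first_bracket_type = "()" then
        -- token_types.index('[]'): membership is guaranteed by the guard above
        match PySem.List.index? token_types "[]" with
        | none => false
        | some idx => if idx > 1 then false else true
      else if first_bracket_type = "[]" then
        let k := pvLeadSq (token_types.drop 1)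
        if 1 + k > 1 then false
        else if 1 + k < token_types.length ∧ token_types.getD (1 + k) "" = "()" then false
        else true
      else false

-- ===== PORT B =====

-- B's depth-counting scan: returns (remaining chars after the token, final depth)
def pvScanB (opener closer : Char) : List Char → Nat → List Char × Nat
  | cs, 0 => (cs, 0)
  | [], d + 1 => ([], d + 1)
  | c :: rest, d + 1 =>
      pvScanB opener closer rest (if c = opener then d + 2 else if c = closer then d else d + 1)

-- B's next_token: skip spaces, consume one balanced bracket token
def pvNextToken (cs : List Char) : Option (Char × List Char) :=
  match cs.dropWhile (· = ' ') with
  | [] => none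
  | c :: rest =>
    if c = '[' ∨ c = '(' then
      let closer := if c = '[' then ']' else ')'
      let r := pvScanB c closer rest 1
      if r.2 = 0 then some (c, r.1) else none
    else none

def is_filename_compliant_alt (name : String) : Bool :=
  match pvNextToken name.toList with
  | none =>
      match PySem.Chars.lstrip name.toList with
      | [] => false
      | c :: _ => c == '[' || c == '('
  | some (kind, pos) =>
      match pvNextToken pos with
      | none => kind == '['
      | some (k2, _) => kind == '(' && k2 == '['

-- ===== PRECONDITION & SPEC =====
def Spec_is_filename_compliant (name : String) (out : Bool) : Prop := out = is_filename_compliant_alt name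
instance (name : String) (out : Bool) : Decidable (Spec_is_filename_compliant name out) := by unfold Spec_is_filename_compliant; infer_instance

-- ===== CLAIM (what is proved, stated in full; the proofs are below) =====
def Claim_equal_is_filename_compliant : Prop := ∀ (name : String), Dom_is_filename_compliant name → Spec_is_filename_compliant name (is_filename_compliant name)

-- ===== LEMMAS AND PROOFS =====

theorem pvScanB_eq_innerA (oc cc : Char) (cs : List Char) (d : Nat) :
    pvScanB oc cc cs d = ((pvInnerA oc cc cs d).2.1, (pvInnerA oc cc cs d).2.2) := by
  induction cs generalizing d with
  | nil => cases d <;> simp [pvScanB, pvInnerA]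
  | cons c rest ih =>
      cases d with
      | zero => simp [pvScanB, pvInnerA]
      | succ d => simp only [pvScanB, pvInnerA]; exact ih _

theorem pvParse_none (cs : List Char) (h : pvNextToken cs = none) :
    pvParseTokens cs = [] := by
  rw [pvParseTokens]
  unfold pvNextToken at h
  cases hd : cs.dropWhile (· = ' ') with
  | nil => simp
  | cons c rest =>
      rw [hd] at h
      simp only at h
      by_cases hc : c = '[' ∨ c = '('
      · rcases hc with hc | hc <;> subst hc <;>
          simp_all [pvScanB_eq_innerA] <;> omega
      · push_neg at hc
        simp [hc.1, hc.2]

theorem pvParse_some (cs : List Char) (c : Char) (rem : List Char)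
    (h : pvNextToken cs = some (c, rem)) :
    (c = '[' ∨ c = '(') ∧
      ∃ s, pvParseTokens cs = ((if c = '[' then "[]" else "()"), s) :: pvParseTokens rem := by
  rw [pvParseTokens]
  unfold pvNextToken at h
  cases hd : cs.dropWhile (· = ' ') with
  | nil => rw [hd] at h; simp at h
  | cons c' rest =>
      rw [hd] at h
      by_cases hc : c' = '[' ∨ c' = '('
      · rcases hc with hc | hc <;> subst hc <;>
          simp only [pvScanB_eq_innerA, reduceIte, reduceCtorEq, Char.reduceEq, or_true,
            or_false, if_true, if_false, eq_self_iff_true, true_or] at h ⊢ <;>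
          split_ifs at h with hd0 <;>
          simp only [Option.some.injEq, Prod.mk.injEq, reduceCtorEq] at h <;>
          obtain ⟨hc1, hc2⟩ := h <;> subst hc1 <;> subst hc2 <;>
          simp [hd0]
      · push_neg at hc
        simp [hc.1, hc.2] at h

-- ===== VERDICT (by name: the statement is the Claim_ definition above) =====
theorem is_filename_compliant_spec : Claim_equal_is_filename_compliant := by
  intro name _
  unfold Spec_is_filename_compliant
  cases h1 : pvNextToken name.toList with
  | none =>
      have hp := pvParse_none _ h1
      simp only [is_filename_compliant, is_filename_compliant_alt, h1, hp, List.isEmpty_nil,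
        if_true]
      cases PySem.Chars.lstrip name.toList with
      | nil => simp
      | cons c cs => by_cases hc : c = '[' ∨ c = '(' <;> simp [hc] <;> tauto
  | some t =>
      obtain ⟨c, rem⟩ := t
      obtain ⟨hck, s, hp⟩ := pvParse_some _ _ _ h1
      cases h2 : pvNextToken rem with
      | none =>
          have hp2 := pvParse_none _ h2
          rw [hp2] at hp
          rcases hck with hc | hc <;> subst hc <;>
            simp [is_filename_compliant, is_filename_compliant_alt, h1, h2, hp, pvLeadSq]
      | some t2 =>
          obtain ⟨c2, rem2⟩ := t2
          obtain ⟨hck2, s2, hp2⟩ := pvParse_some _ _ _ h2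
          rw [hp2] at hp
          rcases hck with hc | hc <;> rcases hck2 with hc2 | hc2 <;> subst hc <;> subst hc2 <;>
            simp [is_filename_compliant, is_filename_compliant_alt, h1, h2, hp, pvLeadSq]
          -- remaining: first token '()' — index-of-first-'[]' arithmetic
          · simp [List.idxOf?_cons]
          · intro x hx
            have hm : "[]" ∈ List.map Prod.fst (pvParseTokens rem2) :=
              List.mem_map.mpr ⟨("[]", x), hx, rfl⟩
            have hs := (PySem.List.index?_isSome_iff
              (xs := List.map Prod.fst (pvParseTokens rem2)) (v := "[]")).mpr hm
            rw [PySem.List.index?_eq_idxOf?] at hs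
            obtain ⟨j, hj⟩ := Option.isSome_iff_exists.mp hs
            simp [List.idxOf?_cons, hj]
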